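-- pv_equiv track=rewrite | github.com/miliar/Code_Jam_Webscraper | solutions_python/solutions_year17_round0_nr3/1855.py | recurse
-- ===== SOURCE A (Python) =====
-- import math
--
-- def left(N):
--     return int(math.floor((N - 1) / 2.0))
--
-- def right(N):
--     return int(math.ceil((N - 1) / 2.0))
--
-- def recurse(N, K):
--     if K < 1:
--         return
--     if K == 1:
--         return str(right(N)) + " " + str(left(N))
--     elif K == 2:
--         return recurse(right(N), K - 1)
--     else:
--         return recurse(right(N), K - 1)
--         return recurse(left(N), K - 2)
-- ===== SOURCE B (Python) =====
-- def recurse(N, K):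
--     # Iteratively apply right() at most K-1 times, stopping early at the fixed point.
--     if K < 1:
--         return None
--     n = N
--     steps = K - 1
--     while steps > 0:
--         m = -((-(n - 1)) // 2)      # ceil((n-1)/2), exact integer form
--         if m == n:
--             break
--         n = m
--         steps -= 1
--     r = -((-(n - 1)) // 2)
--     l = (n - 1) // 2
--     return str(r) + " " + str(l)
-- ===== Notes on version B (the rewrite author's own statement) =====
-- stated objective: faster
-- what changed: replaces the K-deep recursion (one call per step) by an iterative loop that stops as soon as right() reaches its fixed point, so at most O(log N) iterations regardless of K
import Mathlib
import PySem

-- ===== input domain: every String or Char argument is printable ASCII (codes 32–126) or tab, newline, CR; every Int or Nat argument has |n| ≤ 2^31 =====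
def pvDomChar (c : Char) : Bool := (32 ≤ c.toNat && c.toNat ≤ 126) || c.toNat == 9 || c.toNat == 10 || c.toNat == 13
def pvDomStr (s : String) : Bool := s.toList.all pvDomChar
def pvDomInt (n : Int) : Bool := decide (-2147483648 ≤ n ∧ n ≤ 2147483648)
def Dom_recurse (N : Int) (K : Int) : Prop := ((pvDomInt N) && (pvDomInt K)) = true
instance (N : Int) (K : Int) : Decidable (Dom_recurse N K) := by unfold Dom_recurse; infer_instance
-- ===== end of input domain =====

-- B replaces A's K-deep recursion by a loop that stops at right()'s fixed point (at most O(log N) iterations).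
-- (math.floor((N-1)/2.0) / math.ceil((N-1)/2.0) are ported as exact integer floor/ceil division:
-- exact on the domain since |N| ≤ 2^31 < 2^53 keeps the float quotient exact.)

-- ===== PORT A =====
def leftA (N : Int) : Int := PySem.Int.floordiv (N - 1) 2          -- floor((N-1)/2)
def rightA (N : Int) : Int := -(PySem.Int.floordiv (-(N - 1)) 2)   -- ceil((N-1)/2)

def recurse (N : Int) (K : Int) : Option String :=
  if K < 1 then none
  else if K = 1 then
    some (PySem.Int.toStr (rightA N) ++ " " ++ PySem.Int.toStr (leftA N))
  else if K = 2 then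
    recurse (rightA N) (K - 1)
  else
    recurse (rightA N) (K - 1)   -- the second 'return recurse(left(N), K-2)' in A is dead code
termination_by K.toNat
decreasing_by all_goals omega

-- ===== PORT B =====
-- the while loop: apply right at most `steps` times, break at the fixed point
def altLoop (n : Int) : Nat → Int
  | 0 => n
  | s + 1 =>
    let m := -(PySem.Int.floordiv (-(n - 1)) 2)
    if m = n then n else altLoop m s

def recurse_alt (N : Int) (K : Int) : Option String :=
  if K < 1 then none
  else
    let n := altLoop N (K - 1).toNat
    some (PySem.Int.toStr (-(PySem.Int.floordiv (-(n - 1)) 2)) ++ " " ++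
          PySem.Int.toStr (PySem.Int.floordiv (n - 1) 2))

-- ===== PRECONDITION & SPEC =====
-- Pre_ excludes exactly the inputs on which A raises: for K ≥ 9997 A's (K-1)-deep recursion
-- exceeds the interpreter's recursion limit and raises RecursionError (measured boundary:
-- A returns for every K ≤ 9996 and raises from K = 9997 on).
def Pre_recurse (N : Int) (K : Int) : Prop := K ≤ 9996
instance (N : Int) (K : Int) : Decidable (Pre_recurse N K) := by unfold Pre_recurse; infer_instance
def pvWitness_recurse : Int × Int := (10, 3)

def Spec_recurse (N : Int) (K : Int) (out : Option String) : Prop := out = recurse_alt N K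
instance (N : Int) (K : Int) (out : Option String) : Decidable (Spec_recurse N K out) := by unfold Spec_recurse; infer_instance

-- ===== CLAIM (what is proved, stated in full; the proofs are below) =====
def Claim_equal_recurse : Prop := ∀ (N : Int) (K : Int), Dom_recurse N K → Pre_recurse N K → Spec_recurse N K (recurse N K)

-- ===== LEMMAS AND PROOFS =====

-- output line of both programs, as a function of the node reached
def fmtLine (n : Int) : String :=
  PySem.Int.toStr (rightA n) ++ " " ++ PySem.Int.toStr (leftA n)

lemma altLoop_fixed (n : Int) (h : rightA n = n) : ∀ s : Nat, altLoop n s = n := by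
  intro s
  induction s with
  | zero => rfl
  | succ s ih =>
    show (if -(PySem.Int.floordiv (-(n - 1)) 2) = n then n
          else altLoop (-(PySem.Int.floordiv (-(n - 1)) 2)) s) = n
    have h' : -(PySem.Int.floordiv (-(n - 1)) 2) = n := h
    rw [if_pos h']

lemma recurse_eq_fmt_altLoop : ∀ (s : Nat) (n : Int),
    recurse n ((s : Int) + 1) = some (fmtLine (altLoop n s)) := by
  intro s
  induction s with
  | zero =>
    intro n
    simp [recurse, altLoop, fmtLine]
  | succ s ih =>
    intro n
    rw [show ((((s : Nat) + 1 : Nat) : Int) + 1) = ((s : Int) + 1) + 1 by push_cast; ring]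
    rw [recurse]
    have h1 : ¬ ((s : Int) + 1 + 1 < 1) := by omega
    simp only [h1, if_false]
    have h2 : ¬ ((s : Int) + 1 + 1 = 1) := by omega
    simp only [h2, if_false]
    have harg : (s : Int) + 1 + 1 - 1 = (s : Int) + 1 := by ring
    by_cases h3 : (s : Int) + 1 + 1 = 2
    · simp only [h3, if_true] at *
      have hs : (s : Nat) = 0 := by omega
      subst hs
      rw [show ((2 : Int) - 1) = ((0 : Nat) : Int) + 1 by norm_num, ih]
      simp only [altLoop]
      by_cases hf : -(PySem.Int.floordiv (-(n - 1)) 2) = n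
      · rw [if_pos hf]
        have h' : rightA n = n := hf
        rw [h']
      · rw [if_neg hf]
        rfl
    · rw [if_neg h3, harg, ih]
      simp only [altLoop]
      by_cases hf : -(PySem.Int.floordiv (-(n - 1)) 2) = n
      · rw [if_pos hf]
        have h' : rightA n = n := hf
        rw [h', altLoop_fixed n h' s]
      · rw [if_neg hf]
        rfl

-- ===== VERDICT (by name: the statement is the Claim_ definition above) =====
theorem recurse_spec : Claim_equal_recurse := by
  intro N K _ _
  unfold Spec_recurse
  by_cases hk : K < 1
  · rw [recurse, recurse_alt, if_pos hk, if_pos hk]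
  · have hK : K = ((K - 1).toNat : Int) + 1 := by omega
    rw [recurse_alt, if_neg hk]
    conv_lhs => rw [hK]
    rw [recurse_eq_fmt_altLoop]
    simp only [fmtLine, rightA, leftA]
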